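-- pv_equiv track=rewrite | github.com/Lalan12309/Python- | ppp.py | minimizeMaxParcelLoad
-- ===== SOURCE A (Python) =====
-- import bisect
--
-- def minimizeMaxParcelLoad(initialParcels, additionalParcels):
--     initialParcels.sort()
--     n = len(initialParcels)
--     prefix = [0] * (n+1)
--     for i, v in enumerate(initialParcels):
--         prefix[i+1] = prefix[i] + v
--
--     lo = initialParcels[-1]
--     hi = lo + additionalParcels
--
--     while lo < hi:
--         mid = (lo + hi) // 2
--         i = bisect.bisect_left(initialParcels, mid)
--         cap = mid * i - prefix[i]
--         if cap >= additionalParcels: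
--             hi = mid
--         else:
--             lo = mid + 1
--     return lo
-- ===== SOURCE B (Python) =====
-- def minimizeMaxParcelLoad(initialParcels, additionalParcels):
--     n = len(initialParcels)
--     level = -(-(sum(initialParcels) + additionalParcels) // n)
--     return max(max(initialParcels), level)
-- ===== Notes on version B (the rewrite author's own statement) =====
-- stated objective: faster
-- what changed: A sorts, builds a prefix-sum table and binary-searches the minimal feasible load level; B computes the same level in closed form as max(max(xs), ceil((sum(xs)+additionalParcels)/n)) in one pass, with no sort, no table and no search.
import Mathlib
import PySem

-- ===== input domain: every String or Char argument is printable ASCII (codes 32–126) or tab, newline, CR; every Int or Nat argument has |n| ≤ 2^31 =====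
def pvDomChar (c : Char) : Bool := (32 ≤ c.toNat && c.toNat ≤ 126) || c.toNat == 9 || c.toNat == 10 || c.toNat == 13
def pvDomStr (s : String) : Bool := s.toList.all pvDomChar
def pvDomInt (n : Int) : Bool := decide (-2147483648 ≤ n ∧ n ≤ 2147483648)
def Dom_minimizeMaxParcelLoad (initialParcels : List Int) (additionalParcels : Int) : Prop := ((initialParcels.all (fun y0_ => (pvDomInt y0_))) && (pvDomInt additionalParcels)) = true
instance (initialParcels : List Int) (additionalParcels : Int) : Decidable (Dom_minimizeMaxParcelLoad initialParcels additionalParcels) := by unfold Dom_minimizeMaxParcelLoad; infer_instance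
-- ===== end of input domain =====

-- B replaces A's sort + prefix table + binary search over the load level by the closed-form
-- water-filling level max(max(xs), ceil((sum(xs)+add)/n)) computed in one pass.
-- A sorts its argument in place (a caller-visible mutation); B does not mutate: the equivalence proved here is about the return value.

-- ===== PORT A =====
-- the while-loop of A: binary search on [lo, hi) using bisect_left and the prefix-sum table
def pvBsLoop (s pfx : List Int) (add : Int) (lo hi : Int) : Int :=
  if h : lo < hi then
    let mid := PySem.Int.floordiv (lo + hi) 2
    let i := PySem.List.bisectLeft s mid
    let cap := mid * (i : Int) - pfx.getD i 0
    if cap ≥ add then pvBsLoop s pfx add lo mid else pvBsLoop s pfx add (mid + 1) hi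
  else lo
termination_by (hi - lo).toNat
decreasing_by
  · have : PySem.Int.floordiv (lo + hi) 2 < hi := by
      rw [PySem.Int.floordiv_lt_iff_lt_mul (by norm_num)]; omega
    omega
  · have h2 := PySem.Int.floordiv_two_mid_bounds (le_of_lt h)
    omega

def minimizeMaxParcelLoad (initialParcels : List Int) (additionalParcels : Int) : Int :=
  let s := PySem.List.sorted initialParcels (fun v => v)
  -- prefix[i+1] = prefix[i] + v, built left to right (the pair carries the running prefix value)
  let pfx := (s.foldl (fun (acc : List Int × Int) v => (acc.1 ++ [acc.2 + v], acc.2 + v)) ([0], 0)).1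
  match PySem.List.pyGet? s (-1) with
  | none => 0  -- IndexError in Python (empty list); excluded by Pre_
  | some lo => pvBsLoop s pfx additionalParcels lo (lo + additionalParcels)

-- ===== PORT B =====
def minimizeMaxParcelLoad_alt (initialParcels : List Int) (additionalParcels : Int) : Int :=
  let n := (initialParcels.length : Int)
  let level := -(PySem.Int.floordiv (-(initialParcels.sum + additionalParcels)) n)
  match PySem.List.max? initialParcels (fun y => y) with
  | none => 0  -- Python raises on the empty list; excluded by Pre_
  | some m => max m level

-- ===== PRECONDITION & SPEC =====
-- Pre_ excludes only the empty list, on which A raises IndexError (and B raises ZeroDivisionError).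
def Pre_minimizeMaxParcelLoad (initialParcels : List Int) (additionalParcels : Int) : Prop :=
  initialParcels ≠ []
instance (initialParcels : List Int) (additionalParcels : Int) : Decidable (Pre_minimizeMaxParcelLoad initialParcels additionalParcels) := by unfold Pre_minimizeMaxParcelLoad; infer_instance
def pvWitness_minimizeMaxParcelLoad : List Int × Int := ([3, 1, 2], 5)

def Spec_minimizeMaxParcelLoad (initialParcels : List Int) (additionalParcels : Int) (out : Int) : Prop := out = minimizeMaxParcelLoad_alt initialParcels additionalParcels
instance (initialParcels : List Int) (additionalParcels : Int) (out : Int) : Decidable (Spec_minimizeMaxParcelLoad initialParcels additionalParcels out) := by unfold Spec_minimizeMaxParcelLoad; infer_instance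

-- ===== CLAIM (what is proved, stated in full; the proofs are below) =====
def Claim_equal_minimizeMaxParcelLoad : Prop := ∀ (initialParcels : List Int) (additionalParcels : Int), Dom_minimizeMaxParcelLoad initialParcels additionalParcels → Pre_minimizeMaxParcelLoad initialParcels additionalParcels → Spec_minimizeMaxParcelLoad initialParcels additionalParcels (minimizeMaxParcelLoad initialParcels additionalParcels)

-- ===== LEMMAS AND PROOFS =====

-- the running-prefix fold, started at (acc, r), appends the partial sums r + take-(k+1) sum
lemma pvScan_aux : ∀ (s acc : List Int) (r : Int),
    (s.foldl (fun (acc : List Int × Int) v => (acc.1 ++ [acc.2 + v], acc.2 + v)) (acc, r)).1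
      = acc ++ (List.range s.length).map (fun k => r + (s.take (k+1)).sum) := by
  intro s
  induction s with
  | nil => simp
  | cons v t ih =>
    intro acc r
    simp only [List.foldl_cons, List.length_cons, List.range_succ_eq_map]
    rw [ih]
    simp [List.map_map, Function.comp, add_assoc, List.append_assoc]

-- hence A's prefix table looked up at i ≤ n is the sum of the first i elements
lemma pvScan_spec (s : List Int) :
    ∀ i ≤ s.length,
      ((s.foldl (fun (acc : List Int × Int) v => (acc.1 ++ [acc.2 + v], acc.2 + v)) ([0], 0)).1).getD i 0
        = (s.take i).sum := by
  intro i hi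
  rw [pvScan_aux]
  match i with
  | 0 => simp
  | (j+1) =>
    have hj : j < s.length := by omega
    simp [List.getD, hj]

-- in a nonempty ≤-sorted list the last element bounds every element
lemma pvLast_max (s : List Int) (hs : s.Pairwise (· ≤ ·)) (hne : s ≠ []) :
    ∀ x ∈ s, x ≤ s.getLast hne := by
  intro x hx
  rcases List.mem_iff_getElem.mp hx with ⟨i, hi, rfl⟩
  have hL : s.getLast hne = s[s.length - 1] := by rw [List.getLast_eq_getElem]
  rw [hL]
  rcases Nat.lt_or_ge i (s.length - 1) with h | h
  · exact List.pairwise_iff_getElem.mp hs i (s.length - 1) hi (by omega) h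
  · have : i = s.length - 1 := by omega
    subst this; exact le_refl _

-- the capacity A computes at a level mid ≥ max(s) equals n*mid - sum(s)
lemma pvCap_eq (s : List Int) (hs : s.Pairwise (· ≤ ·)) (hne : s ≠ []) (mid : Int)
    (hmid : s.getLast hne ≤ mid) :
    mid * (PySem.List.bisectLeft s mid : Int) - (s.take (PySem.List.bisectLeft s mid)).sum
      = mid * (s.length : Int) - s.sum := by
  obtain ⟨hle, hlt, hge⟩ := PySem.List.bisectLeft_spec s mid hs
  set i := PySem.List.bisectLeft s mid with hidef
  have hdrop : ∀ x ∈ s.drop i, x = mid := by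
    intro x hx
    have h1 : mid ≤ x := by
      rcases List.mem_iff_getElem.mp hx with ⟨k, hk, rfl⟩
      have hik : i + k < s.length := by
        have := hk; rw [List.length_drop] at this; omega
      have := List.getElem_drop (xs := s) (i := i) (j := k) (h := by simpa [List.length_drop] using hk)
      rw [this]
      exact hge (i + k) hik (by omega)
    have h2 : x ≤ mid := le_trans (pvLast_max s hs hne x (List.mem_of_mem_drop hx)) hmid
    omega
  have hsum : (s.drop i).sum = mid * ((s.length : Int) - (i : Int)) := by
    have hlen : (s.drop i).length = s.length - i := List.length_drop
    have := List.sum_eq_card_nsmul (s.drop i) mid hdrop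
    rw [this, hlen, nsmul_eq_mul]
    push_cast [Nat.cast_sub hle]
    ring
  have hsplit : s.sum = (s.take i).sum + (s.drop i).sum := by
    rw [← List.sum_append, List.take_append_drop]
  rw [hsplit, hsum]
  ring

-- the loop exits immediately when the bracket is empty
lemma pvBsLoop_stop (s pfx : List Int) (add lo hi : Int) (h : ¬ lo < hi) :
    pvBsLoop s pfx add lo hi = lo := by
  rw [pvBsLoop, dif_neg h]

-- the binary search converges to the target level it brackets
lemma pvBsLoop_eq (s pfx : List Int) (hs : s.Pairwise (· ≤ ·)) (hne : s ≠ []) (add : Int)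
    (hp : ∀ i ≤ s.length, pfx.getD i 0 = (s.take i).sum)
    (target : Int)
    (htc : ∀ mid, s.getLast hne ≤ mid →
        (mid * (s.length : Int) - s.sum ≥ add ↔ target ≤ mid)) :
    ∀ lo hi, s.getLast hne ≤ lo → lo ≤ target → target ≤ hi →
      pvBsLoop s pfx add lo hi = target := by
  suffices H : ∀ n : Nat, ∀ lo hi, (hi - lo).toNat ≤ n → s.getLast hne ≤ lo → lo ≤ target → target ≤ hi →
      pvBsLoop s pfx add lo hi = target by
    exact fun lo hi h1 h2 h3 => H (hi - lo).toNat lo hi le_rfl h1 h2 h3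
  intro n
  induction n with
  | zero =>
    intro lo hi hn hm hlo hhi
    rw [pvBsLoop, dif_neg (by omega)]
    omega
  | succ n ih =>
    intro lo hi hn hm hlo hhi
    rw [pvBsLoop]
    by_cases hlt : lo < hi
    · rw [dif_pos hlt]
      have hb := PySem.Int.floordiv_two_mid_bounds (le_of_lt hlt)
      have hmlt : PySem.Int.floordiv (lo + hi) 2 < hi := by
        rw [PySem.Int.floordiv_lt_iff_lt_mul (by norm_num)]; omega
      set mid := PySem.Int.floordiv (lo + hi) 2 with hmd
      have hmm : s.getLast hne ≤ mid := le_trans hm hb.1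
      have hcap : mid * ((PySem.List.bisectLeft s mid : Nat) : Int)
            - pfx.getD (PySem.List.bisectLeft s mid) 0
          = mid * (s.length : Int) - s.sum := by
        rw [hp _ (PySem.List.bisectLeft_spec s mid hs).1]
        exact pvCap_eq s hs hne mid hmm
      show (if mid * ((PySem.List.bisectLeft s mid : Nat) : Int)
            - pfx.getD (PySem.List.bisectLeft s mid) 0 ≥ add
          then pvBsLoop s pfx add lo mid else pvBsLoop s pfx add (mid + 1) hi) = target
      rw [hcap]
      by_cases hc : mid * (s.length : Int) - s.sum ≥ add
      · rw [if_pos hc]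
        exact ih lo mid (by omega) hm hlo ((htc mid hmm).mp hc)
      · rw [if_neg hc]
        have : ¬ target ≤ mid := fun h => hc ((htc mid hmm).mpr h)
        exact ih (mid + 1) hi (by omega) (by omega) (by omega) hhi
    · rw [dif_neg hlt]
      omega

theorem pv_main (xs : List Int) (add : Int) (hne : xs ≠ []) :
    minimizeMaxParcelLoad xs add = minimizeMaxParcelLoad_alt xs add := by
  have hperm : (PySem.List.sorted xs (fun v => v)).Perm xs := PySem.List.sorted_perm xs (fun v => v) false
  have hs : (PySem.List.sorted xs (fun v => v)).Pairwise (· ≤ ·) := PySem.List.sorted_pairwise xs (fun v => v)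
  set s := PySem.List.sorted xs (fun v => v) with hsdef
  have hsne : s ≠ [] := by
    intro h; apply hne
    have := hperm.length_eq; rw [h] at this
    exact List.length_eq_zero_iff.mp this.symm
  set m := s.getLast hsne with hmdef
  have hget : PySem.List.pyGet? s (-1) = some m := by
    rw [PySem.List.pyGet?_neg_one, List.getLast?_eq_some_getLast]
  have hn : (0:Int) < (xs.length : Int) := by
    have : xs.length ≠ 0 := by simpa using hne
    omega
  have hlen : s.length = xs.length := hperm.length_eq
  have hsum : s.sum = xs.sum := hperm.sum_eq
  have hmax : ∀ x ∈ s, x ≤ m := pvLast_max s hs hsne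
  -- B's max(xs) has the value m
  obtain ⟨M, hM⟩ : ∃ M, PySem.List.max? xs (fun y => y) = some M := by
    cases hmx : PySem.List.max? xs (fun y => y) with
    | none => exact absurd ((PySem.List.max?_eq_none_iff xs _).mp hmx) hne
    | some M => exact ⟨M, rfl⟩
  have hMeq : M = m := by
    apply le_antisymm
    · exact hmax M (hperm.mem_iff.mpr (PySem.List.max?_mem hM))
    · exact PySem.List.max?_isMax hM _ (hperm.mem_iff.mp (List.getLast_mem hsne))
  -- the ceiling level and its characterisation
  set L := -(PySem.Int.floordiv (-(xs.sum + add)) (xs.length : Int)) with hLdef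
  have hLc : (L - 1) * (xs.length : Int) < xs.sum + add ∧ xs.sum + add ≤ L * (xs.length : Int) :=
    (PySem.Int.neg_floordiv_neg_eq_iff_of_pos hn).mp rfl
  have hSm : s.sum ≤ (s.length : Int) * m := by
    have := List.sum_le_card_nsmul s m hmax
    rw [nsmul_eq_mul] at this
    exact this
  have htc : ∀ mid, m ≤ mid →
      (mid * (s.length : Int) - s.sum ≥ add ↔ max m L ≤ mid) := by
    intro mid hmm
    rw [hlen, hsum]
    constructor
    · intro hc
      have hLm : L ≤ mid := by
        by_contra hcon
        have h1 : mid ≤ L - 1 := by omega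
        have := mul_le_mul_of_nonneg_right h1 (le_of_lt hn)
        omega
      exact max_le hmm hLm
    · intro hc
      have hLm : L ≤ mid := le_trans (le_max_right m L) hc
      have := mul_le_mul_of_nonneg_right hLm (le_of_lt hn)
      omega
  -- unfold both sides
  show (match PySem.List.pyGet? s (-1) with
        | none => 0
        | some lo => pvBsLoop s
            ((s.foldl (fun (acc : List Int × Int) v => (acc.1 ++ [acc.2 + v], acc.2 + v)) ([0], 0)).1)
            add lo (lo + add))
      = (match PySem.List.max? xs (fun y => y) with
        | none => 0
        | some mm => max mm L)
  rw [hget, hM, hMeq]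
  have hLm_of : add ≤ 0 → L ≤ m := by
    intro ha
    by_contra hcon
    have h1 : m ≤ L - 1 := by omega
    have := mul_le_mul_of_nonneg_right h1 (le_of_lt hn)
    rw [hlen] at hSm
    have : xs.sum ≤ (L - 1) * (xs.length : Int) := by nlinarith
    omega
  by_cases ha : 0 < add
  · -- the loop runs; it converges to max m L
    have htgt_hi : max m L ≤ m + add := by
      have hLa : L ≤ m + add := by
        by_contra hcon
        have h1 : m + add ≤ L - 1 := by omega
        have h2 := mul_le_mul_of_nonneg_right h1 (le_of_lt hn)
        rw [hlen] at hSm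
        have : xs.sum + add ≤ (L - 1) * (xs.length : Int) := by nlinarith
        omega
      have : m ≤ m + add := by omega
      exact max_le this hLa
    exact pvBsLoop_eq s _ hs hsne add (pvScan_spec s) (max m L) htc m (m + add)
      le_rfl (le_max_left m L) htgt_hi
  · -- add ≤ 0: the loop exits immediately with m, and max m L = m
    have hL : L ≤ m := hLm_of (by omega)
    have hstop : pvBsLoop s
        ((s.foldl (fun (acc : List Int × Int) v => (acc.1 ++ [acc.2 + v], acc.2 + v)) ([0], 0)).1)
        add m (m + add) = m := pvBsLoop_stop _ _ add m (m + add) (by omega)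
    exact hstop.trans (max_eq_left hL).symm

-- ===== VERDICT (by name: the statement is the Claim_ definition above) =====
theorem minimizeMaxParcelLoad_spec : Claim_equal_minimizeMaxParcelLoad := by
  intro xs add _ hpre
  exact pv_main xs add hpre
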